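-- pv_equiv track=rewrite | github.com/pavl-kuzkin/advent_of_code_2022 | 2022/15-beacon-manhattan-radius/main.py | combine_range_recr
-- ===== SOURCE A (Python) =====
-- def can_combine(r1, r2):
--     x1, y1 = r1
--     x2, y2 = r2
--     return x2 <= y1 <= y2 or x1 <= y2 <= y1 or (y1 < y2 and y1 + 1 == x2) or (y2 < y1 and y2 + 1 == x1)
--
-- def combine_range(r1, r2):
--     x1, y1 = r1
--     x2, y2 = r2
--     return min(x1, x2), max(y1, y2)
--
-- def combine_range_recr(range_list):
--     for i in range(len(range_list) - 1):
--         r1 = range_list[i]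
--         r2 = range_list[i + 1]
--         if can_combine(r1, r2):
--             range_list[i + 1] = combine_range(r1, r2)
--             range_list[i] = None
--
--     return list(filter(lambda x: x is not None, range_list))
-- ===== SOURCE B (Python) =====
-- def can_combine(r1, r2):
--     x1, y1 = r1
--     x2, y2 = r2
--     return x2 <= y1 <= y2 or x1 <= y2 <= y1 or (y1 < y2 and y1 + 1 == x2) or (y2 < y1 and y2 + 1 == x1)
--
-- def combine_range(r1, r2):
--     x1, y1 = r1
--     x2, y2 = r2
--     return min(x1, x2), max(y1, y2)
--
-- def combine_range_recr(range_list):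
--     # Staged approach: first materialise a scan table, then extract the answer from it.
--     # Pass 1: for each element record (starts_new_run, carried_merge_so_far).
--     scan = []
--     for r in range_list:
--         if scan and can_combine(scan[-1][1], r):
--             scan.append((False, combine_range(scan[-1][1], r)))
--         else:
--             scan.append((True, r))
--     # Pass 2: a run's final merged value is the carried merge recorded just before the
--     # next run starts; the last run's value is the final carried merge.
--     out = [prev[1] for prev, cur in zip(scan, scan[1:]) if cur[0]]
--     if scan:
--         out.append(scan[-1][1])
--     return out
-- ===== Notes on version B (the rewrite author's own statement) =====
-- stated objective: alternative
-- what changed: Replaces A's in-place index loop that writes None sentinels into the input and filters them out with two staged passes over a materialised scan table: pass 1 records (run-start flag, carried merge) per element, pass 2 extracts the merge recorded just before each run start plus the final one (B also does not mutate its argument; equivalence is about the return value).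
import Mathlib
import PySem

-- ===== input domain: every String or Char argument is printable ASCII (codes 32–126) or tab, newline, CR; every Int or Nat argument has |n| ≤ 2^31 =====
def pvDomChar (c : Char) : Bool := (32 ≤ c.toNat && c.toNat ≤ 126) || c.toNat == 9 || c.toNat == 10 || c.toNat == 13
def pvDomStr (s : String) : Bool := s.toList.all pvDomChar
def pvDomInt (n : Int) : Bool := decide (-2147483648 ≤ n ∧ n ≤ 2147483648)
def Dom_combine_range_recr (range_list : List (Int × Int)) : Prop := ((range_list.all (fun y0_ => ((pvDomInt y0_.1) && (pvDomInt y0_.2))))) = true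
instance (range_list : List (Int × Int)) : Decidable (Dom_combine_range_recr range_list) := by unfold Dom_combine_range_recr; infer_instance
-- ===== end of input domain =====

-- B replaces A's in-place None-sentinel loop + filter with two staged passes over a
-- materialised scan table (equivalence is about the RETURN value only: Python A mutates
-- its argument, B does not).

-- ===== PORT A =====
def can_combine (r1 r2 : Int × Int) : Bool :=
  (r2.1 ≤ r1.2 && r1.2 ≤ r2.2) || (r1.1 ≤ r2.2 && r2.2 ≤ r1.2) ||
  (r1.2 < r2.2 && r1.2 + 1 == r2.1) || (r2.2 < r1.2 && r2.2 + 1 == r1.1)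

def combine_range (r1 r2 : Int × Int) : Int × Int := (min r1.1 r2.1, max r1.2 r2.2)

-- the for-loop over range(len-1), mutating the list (None = none), then the filter pass
def combine_range_recr (range_list : List (Int × Int)) : List (Int × Int) :=
  let st := (PySem.List.pyRange 0 ((range_list.length : Int) - 1) 1).foldl
    (fun (st : List (Option (Int × Int))) i =>
      match PySem.List.pyGet? st i, PySem.List.pyGet? st (i + 1) with
      | some (some r1), some (some r2) =>
          if can_combine r1 r2 then
            (st.set (i + 1).toNat (some (combine_range r1 r2))).set i.toNat none
          else st
      | _, _ => st)
    (range_list.map some)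
  st.filterMap id

-- ===== PORT B =====
def combine_range_recr_alt (range_list : List (Int × Int)) : List (Int × Int) :=
  -- pass 1: the scan table — (starts_new_run, carried_merge_so_far) per element
  let scan := range_list.foldl
    (fun (scan : List (Bool × (Int × Int))) r =>
      match scan.getLast? with
      | some last =>
          if can_combine last.2 r then scan ++ [(false, combine_range last.2 r)]
          else scan ++ [(true, r)]
      | none => scan ++ [(true, r)]) []
  -- pass 2: the merge recorded just before each run start, plus the final carried merge
  let out := ((scan.zip scan.tail).filter (fun pc => pc.2.1)).map (fun pc => pc.1.2)
  match scan.getLast? with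
  | some last => out ++ [last.2]
  | none => out

-- ===== PRECONDITION & SPEC =====
def Spec_combine_range_recr (range_list : List (Int × Int)) (out : List (Int × Int)) : Prop := out = combine_range_recr_alt range_list
instance (range_list : List (Int × Int)) (out : List (Int × Int)) : Decidable (Spec_combine_range_recr range_list out) := by unfold Spec_combine_range_recr; infer_instance

-- ===== CLAIM (what is proved, stated in full; the proofs are below) =====
def Claim_equal_combine_range_recr : Prop := ∀ (range_list : List (Int × Int)), Dom_combine_range_recr range_list → Spec_combine_range_recr range_list (combine_range_recr range_list)

-- ===== LEMMAS AND PROOFS =====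

-- common characterisation: merge a run carried in `cur` through the tail
def mergeRun : (Int × Int) → List (Int × Int) → List (Int × Int)
  | cur, [] => [cur]
  | cur, n :: rest =>
      if can_combine cur n then mergeRun (combine_range cur n) rest
      else cur :: mergeRun n rest

-- the scan table B's first pass computes, carried value made explicit
def scanBody : (Int × Int) → List (Int × Int) → List (Bool × (Int × Int))
  | _, [] => []
  | cur, n :: rest =>
      if can_combine cur n then (false, combine_range cur n) :: scanBody (combine_range cur n) rest
      else (true, n) :: scanBody n rest

-- B's pass 1 fold computes scanBody
lemma altScan (rest : List (Int × Int)) : ∀ (acc : List (Bool × (Int × Int))) (b : Bool) (cur : Int × Int),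
    acc.getLast? = some (b, cur) →
    rest.foldl
      (fun (scan : List (Bool × (Int × Int))) r =>
        match scan.getLast? with
        | some last =>
            if can_combine last.2 r then scan ++ [(false, combine_range last.2 r)]
            else scan ++ [(true, r)]
        | none => scan ++ [(true, r)]) acc
    = acc ++ scanBody cur rest := by
  induction rest with
  | nil => intro acc b cur _; simp [scanBody]
  | cons n rest ih =>
      intro acc b cur h
      simp only [List.foldl_cons, h, scanBody]
      by_cases hc : can_combine cur n = true
      · simp only [hc, if_pos]
        rw [ih (acc ++ [(false, combine_range cur n)]) false (combine_range cur n) (by simp)]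
        simp
      · simp only [Bool.not_eq_true] at hc
        simp only [hc, Bool.false_eq_true, if_false]
        rw [ih (acc ++ [(true, n)]) true n (by simp)]
        simp

-- B's pass 2 extraction over the scan table yields mergeRun
lemma altExtract (rest : List (Int × Int)) : ∀ (b0 : Bool) (cur : Int × Int),
    (let s := (b0, cur) :: scanBody cur rest
     let out := ((s.zip s.tail).filter (fun pc => pc.2.1)).map (fun pc => pc.1.2)
     match s.getLast? with
     | some last => out ++ [last.2]
     | none => out)
    = mergeRun cur rest := by
  induction rest with
  | nil => intro b0 cur; simp [scanBody, mergeRun]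
  | cons n rest ih =>
      intro b0 cur
      simp only [scanBody, mergeRun]
      by_cases hc : can_combine cur n = true
      · simp only [hc, if_pos]
        have := ih false (combine_range cur n)
        simp only at this ⊢
        rw [← this]
        simp [List.zip]
      · simp only [Bool.not_eq_true] at hc
        simp only [hc, Bool.false_eq_true, if_false]
        have := ih true n
        simp only at this ⊢
        rw [← this]
        cases h : ((true, n) :: scanBody n rest).getLast? with
        | none => simp at h
        | some last => simp [h]

-- A's indexed loop computes mergeRun (invariant: processed prefix `pre`, carried `cur`, untouched tail)
lemma loopA (rest : List (Int × Int)) : ∀ (pre : List (Option (Int × Int))) (cur : Int × Int),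
    (((PySem.List.pyRange (pre.length : Int) ((pre.length : Int) + (rest.length : Int)) 1).foldl
      (fun (st : List (Option (Int × Int))) i =>
        match PySem.List.pyGet? st i, PySem.List.pyGet? st (i + 1) with
        | some (some r1), some (some r2) =>
            if can_combine r1 r2 then
              (st.set (i + 1).toNat (some (combine_range r1 r2))).set i.toNat none
            else st
        | _, _ => st)
      (pre ++ some cur :: rest.map some)).filterMap id)
    = pre.filterMap id ++ mergeRun cur rest := by
  induction rest with
  | nil =>
      intro pre cur
      rw [PySem.List.pyRange_one_eq_nil (by simp)]
      simp [mergeRun]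
  | cons r rest ih =>
      intro pre cur
      have hlt : (pre.length : Int) < (pre.length : Int) + ((r :: rest).length : Int) := by
        simp only [List.length_cons]; push_cast; omega
      rw [PySem.List.pyRange_one_cons hlt]
      simp only [List.foldl_cons]
      have hget1 : PySem.List.pyGet? (pre ++ some cur :: (r :: rest).map some) (pre.length : Int)
          = some (some cur) := by
        simp
      have hget2 : PySem.List.pyGet? (pre ++ some cur :: (r :: rest).map some) ((pre.length : Int) + 1)
          = some (some r) := by
        rw [show ((pre.length : Int) + 1) = ((pre.length + 1 : Nat) : Int) by push_cast; ring,
          PySem.List.pyGet?_natCast, List.getElem?_append_right (Nat.le_succ _),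
          show pre.length + 1 - pre.length = 1 by omega]
        rfl
      rw [hget1, hget2]
      by_cases h : can_combine cur r = true
      · simp only [h, if_pos]
        have hset : ((pre ++ some cur :: (r :: rest).map some).set
              ((pre.length : Int) + 1).toNat (some (combine_range cur r))).set
              (pre.length : Int).toNat none
            = (pre ++ [none]) ++ some (combine_range cur r) :: rest.map some := by
          rw [show ((pre.length : Int) + 1).toNat = pre.length + 1 by omega,
            show ((pre.length : Int)).toNat = pre.length by omega]
          rw [List.set_append_right _ _ (by omega), List.set_append_right _ _ (le_refl _)]
          simp
        rw [hset]
        have harg1 : (pre.length : Int) + 1 = (((pre ++ [none]).length : Nat) : Int) := by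
          simp
        have harg2 : (pre.length : Int) + ((r :: rest).length : Int)
            = (((pre ++ [none]).length : Nat) : Int) + (rest.length : Int) := by
          simp; ring
        rw [harg1, harg2, ih (pre ++ [none]) (combine_range cur r)]
        simp [mergeRun, h]
      · simp only [Bool.not_eq_true] at h
        simp only [h, Bool.false_eq_true, if_false]
        have hst : pre ++ some cur :: (r :: rest).map some
            = (pre ++ [some cur]) ++ some r :: rest.map some := by simp
        have harg1 : (pre.length : Int) + 1 = (((pre ++ [some cur]).length : Nat) : Int) := by
          simp
        have harg2 : (pre.length : Int) + ((r :: rest).length : Int)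
            = (((pre ++ [some cur]).length : Nat) : Int) + (rest.length : Int) := by
          simp; ring
        rw [hst, harg1, harg2, ih (pre ++ [some cur]) r]
        simp [mergeRun, h]

-- ===== VERDICT (by name: the statement is the Claim_ definition above) =====
theorem combine_range_recr_spec : Claim_equal_combine_range_recr := by
  intro range_list _
  unfold Spec_combine_range_recr combine_range_recr combine_range_recr_alt
  cases range_list with
  | nil => simp [PySem.List.pyRange_one_eq_nil]
  | cons r rest =>
      -- A-side reduces to mergeRun r rest
      have hb : (((r :: rest).length : Nat) : Int) - 1
          = ((([] : List (Option (Int × Int))).length : Nat) : Int) + (rest.length : Int) := by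
        simp
      simp only [hb]
      rw [show ((r :: rest).map some) = ([] : List (Option (Int × Int))) ++ some r :: rest.map some by simp,
        show (0 : Int) = ((([] : List (Option (Int × Int))).length : Nat) : Int) by simp] at *
      rw [loopA rest [] r]
      -- B-side reduces to mergeRun r rest
      simp only [List.foldl_cons, List.getLast?_nil, List.nil_append]
      rw [altScan rest [(true, r)] true r (by simp)]
      have := altExtract rest true r
      simp only at this
      simp only [List.singleton_append] at this ⊢
      rw [this]
      simp
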